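-- pv_equiv track=rewrite | github.com/RCF-117/MemSLM | llm_long_memory/processing/graph_builder.py | _extract_first_capitalized_phrase
-- ===== SOURCE A (Python) =====
-- from typing import Any, Dict, List
--
-- def _extract_first_capitalized_phrase(sentence: str, max_tokens: int) -> str:
--     tokens = sentence.strip().split()
--     phrase: List[str] = []
--     for tok in tokens:
--         normalized = tok.strip(".,!?;:()[]{}")
--         if normalized[:1].isupper() and normalized.lower() not in {"i", "the", "a", "an"}:
--             phrase.append(normalized)
--             if len(phrase) >= max_tokens:
--                 break
--         elif phrase:
--             break
--     return " ".join(phrase).strip()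
-- ===== SOURCE B (Python) =====
-- def _qualifies(n: str) -> bool:
--     return n[:1].isupper() and n.lower() not in {"i", "the", "a", "an"}
--
--
-- def _extract_first_capitalized_phrase(sentence: str, max_tokens: int) -> str:
--     normed = [tok.strip(".,!?;:()[]{}") for tok in sentence.strip().split()]
--     flags = [_qualifies(n) for n in normed]
--     if True not in flags:
--         return ""
--     start = flags.index(True)
--     end = start
--     while end < len(normed) and flags[end] and end - start < max_tokens:
--         end += 1
--     return " ".join(normed[start:end]).strip()
-- ===== Notes on version B (the rewrite author's own statement) =====
-- stated objective: alternative
-- what changed: Replaces A's single stateful skip-then-collect loop (accumulator with in-loop break conditions) by a precomputed qualification-flag list plus index arithmetic: the phrase is the slice from the first qualifying index to the end of its run, capped at max_tokens by a bounded scan.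
-- intended difference: On inputs with max_tokens <= 0 whose sentence contains a qualifying capitalized token, A still returns that first token (it checks the cap only after appending), while B returns the empty string, the intended value for a non-positive token cap. — e.g. on _extract_first_capitalized_phrase("Paris", 0): A returns "Paris", B returns ""
import Mathlib
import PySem

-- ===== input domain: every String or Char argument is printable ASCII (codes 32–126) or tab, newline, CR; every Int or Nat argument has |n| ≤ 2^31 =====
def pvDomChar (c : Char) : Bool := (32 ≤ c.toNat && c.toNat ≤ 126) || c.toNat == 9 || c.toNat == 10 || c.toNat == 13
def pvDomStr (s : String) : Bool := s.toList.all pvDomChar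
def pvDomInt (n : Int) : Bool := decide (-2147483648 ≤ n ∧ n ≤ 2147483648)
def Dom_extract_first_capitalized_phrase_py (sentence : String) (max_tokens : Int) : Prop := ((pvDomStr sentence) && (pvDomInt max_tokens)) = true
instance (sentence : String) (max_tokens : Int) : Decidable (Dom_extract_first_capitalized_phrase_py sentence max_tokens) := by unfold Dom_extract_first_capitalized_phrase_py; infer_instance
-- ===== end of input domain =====

-- B replaces A's stateful skip-then-collect loop by a flag list plus index arithmetic
-- (first qualifying index, a bounded scan for the end of its run, one slice); for a
-- non-positive max_tokens B returns "" where A still returns one token (stated in D_ below).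

-- shared token helpers (both Pythons compute these same per-token values)
def pvNorm (tok : List Char) : List Char :=
  PySem.Chars.stripChars tok ".,!?;:()[]{}".toList

-- normalized[:1].isupper(): exact — the slice has length ≤ 1, and Python's str.isupper
-- on "" is False and on a single char equals that char's isupper.
def pvQual (n : List Char) : Bool :=
  (match PySem.Chars.slice n none (some 1) with
   | [c] => PySem.Chars.isupper c
   | _ => false)
  && !([['i'], ['t','h','e'], ['a'], ['a','n']].contains (PySem.Chars.lower n))

-- ===== PORT A =====
-- A's for-loop over tokens with the `phrase` accumulator, break conditions in source order
def pvAuxA (max_tokens : Int) : List (List Char) → List (List Char) → List (List Char)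
  | [], phrase => phrase
  | tok :: rest, phrase =>
    let normalized := pvNorm tok
    if pvQual normalized then
      let phrase' := phrase ++ [normalized]
      if max_tokens ≤ (phrase'.length : Int) then phrase'
      else pvAuxA max_tokens rest phrase'
    else if phrase.isEmpty then pvAuxA max_tokens rest phrase
    else phrase

def extract_first_capitalized_phrase_py (sentence : String) (max_tokens : Int) : String :=
  let tokens := PySem.Chars.split₀ (PySem.Chars.strip sentence.toList)
  let phrase := pvAuxA max_tokens tokens []
  String.ofList (PySem.Chars.strip (PySem.Chars.join [' '] phrase))

-- ===== PORT B =====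
-- B's while loop `while end < len(normed) and flags[end] and end - start < max_tokens`,
-- walked over flags[start:] with the remaining budget max_tokens - (end - start);
-- it returns end - start (the number of steps taken). Exact: same tests, same order.
def pvRunB : List Bool → Int → Nat
  | [], _ => 0
  | f :: r, budget => if f && decide (0 < budget) then pvRunB r (budget - 1) + 1 else 0

def extract_first_capitalized_phrase_py_alt (sentence : String) (max_tokens : Int) : String :=
  let normed := (PySem.Chars.split₀ (PySem.Chars.strip sentence.toList)).map pvNorm
  let flags := normed.map pvQual
  if flags.contains true then
    let start := flags.idxOf true                 -- flags.index(True); in range since True ∈ flags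
    let n := pvRunB (flags.drop start) max_tokens -- the while loop; end = start + n
    -- normed[start:end] = (drop start).take (end - start): exact, 0 ≤ start ≤ end ≤ len
    String.ofList (PySem.Chars.strip (PySem.Chars.join [' '] ((normed.drop start).take n)))
  else ""

-- ===== PRECONDITION & SPEC =====
-- On inputs with max_tokens ≤ 0 whose sentence contains a qualifying capitalized token,
-- A still returns that first token (it checks the cap only after appending), while B
-- returns the empty string, the intended value for a non-positive token cap.
def D_extract_first_capitalized_phrase_py (sentence : String) (max_tokens : Int) : Prop :=
  max_tokens ≤ 0 ∧
    ((((PySem.Chars.split₀ (PySem.Chars.strip sentence.toList)).map pvNorm).map pvQual).contains true) = true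
instance (sentence : String) (max_tokens : Int) : Decidable (D_extract_first_capitalized_phrase_py sentence max_tokens) := by unfold D_extract_first_capitalized_phrase_py; infer_instance

def Spec_extract_first_capitalized_phrase_py (sentence : String) (max_tokens : Int) (out : String) : Prop := ¬ D_extract_first_capitalized_phrase_py sentence max_tokens → out = extract_first_capitalized_phrase_py_alt sentence max_tokens
instance (sentence : String) (max_tokens : Int) (out : String) : Decidable (Spec_extract_first_capitalized_phrase_py sentence max_tokens out) := by unfold Spec_extract_first_capitalized_phrase_py; infer_instance

def pvDiffWitness_extract_first_capitalized_phrase_py : String × Int := ("Paris", 0)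
def pvDiffWitnessOut_extract_first_capitalized_phrase_py : String × String := ("Paris", "")

-- ===== CLAIM (what is proved, stated in full; the proofs are below) =====
def Claim_unchanged_extract_first_capitalized_phrase_py : Prop := ∀ (sentence : String) (max_tokens : Int), Dom_extract_first_capitalized_phrase_py sentence max_tokens → Spec_extract_first_capitalized_phrase_py sentence max_tokens (extract_first_capitalized_phrase_py sentence max_tokens)
def Claim_changed_extract_first_capitalized_phrase_py : Prop := Dom_extract_first_capitalized_phrase_py (pvDiffWitness_extract_first_capitalized_phrase_py.1) (pvDiffWitness_extract_first_capitalized_phrase_py.2) ∧ D_extract_first_capitalized_phrase_py (pvDiffWitness_extract_first_capitalized_phrase_py.1) (pvDiffWitness_extract_first_capitalized_phrase_py.2) ∧ extract_first_capitalized_phrase_py (pvDiffWitness_extract_first_capitalized_phrase_py.1) (pvDiffWitness_extract_first_capitalized_phrase_py.2) = pvDiffWitnessOut_extract_first_capitalized_phrase_py.1 ∧ extract_first_capitalized_phrase_py_alt (pvDiffWitness_extract_first_capitalized_phrase_py.1) (pvDiffWitness_extract_first_capitalized_phrase_py.2) = pvDiffWitnessOut_extract_first_capitalized_phrase_py.2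 ∧ pvDiffWitnessOut_extract_first_capitalized_phrase_py.1 ≠ pvDiffWitnessOut_extract_first_capitalized_phrase_py.2
def Claim_exact_extract_first_capitalized_phrase_py : Prop := ∀ (sentence : String) (max_tokens : Int), Dom_extract_first_capitalized_phrase_py sentence max_tokens → D_extract_first_capitalized_phrase_py sentence max_tokens → extract_first_capitalized_phrase_py sentence max_tokens ≠ extract_first_capitalized_phrase_py_alt sentence max_tokens

-- ===== LEMMAS AND PROOFS =====

-- canonical two-phase form both ports reduce to
def pvTake : List (List Char) → Nat → List (List Char)
  | [], _ => []
  | _ :: _, 0 => []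
  | n :: r, b + 1 => if pvQual n then n :: pvTake r b else []

def pvSkip : List (List Char) → Nat → List (List Char)
  | [], _ => []
  | n :: r, cap => if pvQual n then n :: pvTake r (cap - 1) else pvSkip r cap

-- length of the leading run of `true`s
def leadT : List Bool → Nat
  | [] => 0
  | b :: r => if b then leadT r + 1 else 0

lemma pvTake_nil (b : Nat) : pvTake [] b = [] := by cases b <;> rfl

lemma pvTake_zero (r : List (List Char)) : pvTake r 0 = [] := by cases r <;> rfl

-- B's while loop counts min(leading-true run, max_tokens) when max_tokens ≥ 0
lemma pvRunB_eq (fs : List Bool) (mt : Int) (h : 0 ≤ mt) :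
    pvRunB fs mt = min (leadT fs) mt.toNat := by
  induction fs generalizing mt with
  | nil => simp [pvRunB, leadT]
  | cons f r ih =>
    cases f with
    | false => simp [pvRunB, leadT]
    | true =>
      by_cases hmt : 0 < mt
      · have := ih (mt - 1) (by omega)
        simp only [pvRunB, leadT, hmt, decide_true, Bool.true_and, if_true]
        rw [this]
        omega
      · have hmt0 : mt = 0 := by omega
        subst hmt0
        simp [pvRunB, leadT]

-- B's while loop takes no step when max_tokens ≤ 0
lemma pvRunB_nonpos (fs : List Bool) (mt : Int) (h : mt ≤ 0) : pvRunB fs mt = 0 := by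
  cases fs with
  | nil => rfl
  | cons f r =>
    have : decide (0 < mt) = false := by simp; omega
    simp [pvRunB, this]

-- B's capped slice of the leading qualifying run is pvTake
lemma pvB_take (r : List (List Char)) (b : Nat) :
    r.take (min (leadT (r.map pvQual)) b) = pvTake r b := by
  induction r generalizing b with
  | nil => simp [pvTake_nil]
  | cons n r ih =>
    cases b with
    | zero => simp [pvTake_zero]
    | succ b =>
      by_cases hq : pvQual n
      · have hl : leadT ((n :: r).map pvQual) = leadT (r.map pvQual) + 1 := by
          simp [leadT, hq]
        have hmin : min (leadT (r.map pvQual) + 1) (b + 1) = min (leadT (r.map pvQual)) b + 1 := by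
          omega
        rw [hl, hmin, List.take_succ_cons, ih b]
        simp [pvTake, hq]
      · have hl : leadT ((n :: r).map pvQual) = 0 := by simp [leadT, hq]
        rw [hl]
        simp [pvTake, hq]

-- B's whole core (the `if flags.contains true` block) is pvSkip
lemma pvB_skip (ns : List (List Char)) (cap : Nat) (hcap : 1 ≤ cap) :
    (if (ns.map pvQual).contains true = true then
      (ns.drop ((ns.map pvQual).idxOf true)).take
        (min (leadT ((ns.map pvQual).drop ((ns.map pvQual).idxOf true))) cap)
     else []) = pvSkip ns cap := by
  induction ns with
  | nil => simp [pvSkip]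
  | cons n r ih =>
    by_cases hq : pvQual n
    · have hct : ((n :: r).map pvQual).contains true = true := by simp [hq]
      have hidx : ((n :: r).map pvQual).idxOf true = 0 := by
        simp [hq]
      rw [if_pos hct, hidx, List.drop_zero, List.drop_zero]
      have hl : leadT ((n :: r).map pvQual) = leadT (r.map pvQual) + 1 := by
        simp [leadT, hq]
      obtain ⟨c, rfl⟩ : ∃ c, cap = c + 1 := ⟨cap - 1, by omega⟩
      have hmin : min (leadT (r.map pvQual) + 1) (c + 1) = min (leadT (r.map pvQual)) c + 1 := by
        omega
      rw [hl, hmin, List.take_succ_cons, pvB_take r c]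
      simp [pvSkip, hq]
    · have hct : ((n :: r).map pvQual).contains true = (r.map pvQual).contains true := by
        simp [hq]
      have hsk : pvSkip (n :: r) cap = pvSkip r cap := by simp [pvSkip, hq]
      by_cases hc : (r.map pvQual).contains true = true
      · have hidx : ((n :: r).map pvQual).idxOf true = (r.map pvQual).idxOf true + 1 := by
          simp [hq]
        rw [if_pos (by rw [hct]; exact hc), hidx]
        rw [show ((n :: r).map pvQual) = pvQual n :: r.map pvQual from List.map_cons ..]
        rw [List.drop_succ_cons, List.drop_succ_cons, hsk, ← ih, if_pos hc]
      · rw [if_neg (by rw [hct]; exact hc), hsk, ← ih, if_neg hc]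

-- A's loop in the collect phase (phrase nonempty, budget left) appends pvTake
lemma pvA_collect (mt : Int) (tokens : List (List Char)) (phrase : List (List Char))
    (hne : phrase ≠ []) (hlt : (phrase.length : Int) < mt) :
    pvAuxA mt tokens phrase = phrase ++ pvTake (tokens.map pvNorm) (mt.toNat - phrase.length) := by
  induction tokens generalizing phrase with
  | nil => simp [pvAuxA, pvTake_nil]
  | cons t rest ih =>
    have hk1 : 1 ≤ phrase.length := by
      cases phrase with
      | nil => exact absurd rfl hne
      | cons a l => simp
    by_cases hq : pvQual (pvNorm t)
    · by_cases hbr : mt ≤ ((phrase ++ [pvNorm t]).length : Int)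
      · have hb1 : mt.toNat - phrase.length = 1 := by simp at hbr; omega
        simp only [pvAuxA, hq, if_pos, hbr, List.map_cons, hb1, pvTake]
        simp [pvTake_zero]
      · have hlt' : ((phrase ++ [pvNorm t]).length : Int) < mt := by
          simp at hbr ⊢; omega
        have hrec := ih (phrase ++ [pvNorm t]) (by simp) hlt'
        simp only [pvAuxA, hq, if_pos, hbr, if_neg, not_false_iff]
        rw [hrec]
        obtain ⟨c, hc⟩ : ∃ c, mt.toNat - phrase.length = c + 1 := by
          refine ⟨mt.toNat - phrase.length - 1, ?_⟩
          simp at hbr; omega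
        have hlen : mt.toNat - (phrase ++ [pvNorm t]).length = c := by simp; omega
        rw [hlen]
        simp [List.map_cons, hc, pvTake, hq]
    · have hne' : phrase.isEmpty = false := by
        cases phrase with
        | nil => exact absurd rfl hne
        | cons a l => rfl
      obtain ⟨c, hc⟩ : ∃ c, mt.toNat - phrase.length = c + 1 := by
        refine ⟨mt.toNat - phrase.length - 1, ?_⟩; omega
      simp only [pvAuxA, hq, Bool.false_eq_true, if_neg, not_false_iff, hne',
        List.map_cons, hc, pvTake]
      simp

-- A's loop from the empty phrase is pvSkip with cap max(max_tokens, 1)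
lemma pvA_skip (mt : Int) (tokens : List (List Char)) :
    pvAuxA mt tokens [] = pvSkip (tokens.map pvNorm) (max mt 1).toNat := by
  induction tokens with
  | nil => simp [pvAuxA, pvSkip]
  | cons t rest ih =>
    by_cases hq : pvQual (pvNorm t)
    · by_cases hbr : mt ≤ (([] ++ [pvNorm t] : List (List Char)).length : Int)
      · have hcap : (max mt 1).toNat - 1 = 0 := by simp at hbr; omega
        simp only [pvAuxA]
        rw [if_pos hq, if_pos hbr]
        simp [List.map_cons, pvSkip, hq, hcap, pvTake_zero]
      · have hlt : (([pvNorm t] : List (List Char)).length : Int) < mt := by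
          simp at hbr ⊢; omega
        have hrec := pvA_collect mt rest [pvNorm t] (by simp) hlt
        simp only [pvAuxA]
        rw [if_pos hq, if_neg hbr, List.nil_append, hrec]
        have hcap : (max mt 1).toNat - 1 = mt.toNat - 1 := by simp at hbr; omega
        simp [List.map_cons, pvSkip, hq, hcap]
    · simp only [pvAuxA, hq, Bool.false_eq_true, if_neg, not_false_iff, List.isEmpty_nil,
        if_pos, List.map_cons, pvSkip]
      simp [ih]

-- pvSkip with cap 1 yields exactly the first qualifying token, when one exists
lemma pvSkip_one (ns : List (List Char)) (hc : (ns.map pvQual).contains true = true) :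
    ∃ t, pvSkip ns 1 = [t] ∧ pvQual t = true := by
  induction ns with
  | nil => simp at hc
  | cons n r ih =>
    by_cases hq : pvQual n
    · exact ⟨n, by simp [pvSkip, hq, pvTake_zero], hq⟩
    · have hc' : (r.map pvQual).contains true = true := by
        simpa [hq] using hc
      obtain ⟨t, h1, h2⟩ := ih hc'
      exact ⟨t, by simp [pvSkip, hq, h1], h2⟩

-- a qualifying token starts with an uppercase (hence non-space) character
lemma pvQual_shape (t : List Char) (h : pvQual t = true) :
    ∃ c r, t = c :: r ∧ PySem.Chars.isspace c = false := by
  cases t with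
  | nil => exact absurd h (by decide)
  | cons c r =>
    refine ⟨c, r, rfl, ?_⟩
    have hup : PySem.Chars.isupper c = true := by
      have h1 := (Bool.and_eq_true ..).mp h |>.1
      have hsl : PySem.Chars.slice (c :: r) none (some 1) = [c] := by
        simp [PySem.Chars.slice_eq_listSlice, PySem.List.slice]
      rw [hsl] at h1
      exact h1
    simp only [PySem.Chars.isupper, Bool.and_eq_true, decide_eq_true_eq, Char.le_def] at hup
    simp only [PySem.Chars.isspace]
    have hn1 : 65 ≤ c.toNat := by
      simp only [Char.toNat]
      exact UInt32.le_iff_toNat_le.mp hup.1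
    have hn2 : c.toNat ≤ 90 := by
      simp only [Char.toNat]
      exact UInt32.le_iff_toNat_le.mp hup.2
    simp only [Bool.or_eq_false_iff, Bool.and_eq_false_iff, decide_eq_false_iff_not]
    omega

-- stripping a list headed by a non-space character is nonempty
lemma pvStrip_ne_nil (c : Char) (r : List Char) (h : PySem.Chars.isspace c = false) :
    PySem.Chars.strip (c :: r) ≠ [] := by
  unfold PySem.Chars.strip PySem.Chars.lstrip PySem.Chars.rstrip
  have hdw : List.dropWhile PySem.Chars.isspace (c :: r) = c :: r := by
    rw [List.dropWhile_cons_of_neg (by simp [h])]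
  rw [hdw]
  intro hcon
  rw [List.reverse_eq_nil_iff, List.dropWhile_eq_nil_iff] at hcon
  have := hcon c (by simp)
  rw [h] at this
  exact absurd this (by decide)

-- ===== VERDICT (by name: the statement is the Claim_ definition above) =====
theorem extract_first_capitalized_phrase_py_spec : Claim_unchanged_extract_first_capitalized_phrase_py := by
  intro sentence max_tokens _
  unfold Spec_extract_first_capitalized_phrase_py
  intro hnd
  unfold D_extract_first_capitalized_phrase_py at hnd
  unfold extract_first_capitalized_phrase_py extract_first_capitalized_phrase_py_alt
  simp only
  set ns := (PySem.Chars.split₀ (PySem.Chars.strip sentence.toList)).map pvNorm with hns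
  set fs := ns.map pvQual with hfs
  by_cases hc : fs.contains true = true
  · have hmt : 1 ≤ max_tokens := by
      by_contra hlt
      exact hnd ⟨by omega, hc⟩
    have hmax : max max_tokens 1 = max_tokens := by omega
    rw [pvA_skip, hmax, if_pos hc, pvRunB_eq _ _ (by omega)]
    rw [← pvB_skip ns max_tokens.toNat (by omega), ← hfs, if_pos hc]
  · rw [pvA_skip, ← pvB_skip ns (max max_tokens 1).toNat (by omega), ← hfs,
      if_neg hc, if_neg hc]
    rfl

theorem extract_first_capitalized_phrase_py_changed : Claim_changed_extract_first_capitalized_phrase_py := by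
  unfold Claim_changed_extract_first_capitalized_phrase_py; decide

theorem extract_first_capitalized_phrase_py_tight : Claim_exact_extract_first_capitalized_phrase_py := by
  intro sentence max_tokens _ hD
  unfold D_extract_first_capitalized_phrase_py at hD
  obtain ⟨hmt, hc⟩ := hD
  unfold extract_first_capitalized_phrase_py extract_first_capitalized_phrase_py_alt
  simp only
  set ns := (PySem.Chars.split₀ (PySem.Chars.strip sentence.toList)).map pvNorm with hns
  set fs := ns.map pvQual with hfs
  have hc' : fs.contains true = true := hc
  have hmax : max max_tokens 1 = 1 := by omega
  rw [pvA_skip, hmax, if_pos hc', pvRunB_nonpos _ _ hmt]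
  obtain ⟨t, hsk, hq⟩ := pvSkip_one ns (by rw [← hfs]; exact hc')
  rw [show ((1 : Int)).toNat = 1 from rfl, hsk]
  obtain ⟨c, r, rfl, hsp⟩ := pvQual_shape t hq
  rw [PySem.Chars.join_singleton]
  simp only [List.take_zero]
  intro hcon
  have := congrArg String.toList hcon
  simp only [String.toList_ofList] at this
  have h0 : PySem.Chars.strip (PySem.Chars.join [' '] []) = [] := by decide
  rw [h0] at this
  exact pvStrip_ne_nil c r hsp this
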